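-- pv_equiv track=rewrite | github.com/VersionClimber/VersionClimber | test/distributed/test_server.py | findworkingminiseries
-- ===== SOURCE A (Python) =====
-- def findworkingminiseries(miniseries, anchor_config):
--     """ find the working miniseries from a set of anchors.
--
--     :TODO:
--         - add the list of packages
--
--     # CPL: Question: Do we select only one version for supply-constant?
--     """
--     out = []
--     i = -1
--     currentpackage = ''
--     anchor = None
--     new = []
--     found = False
--
--     for p in miniseries:
--         pkgname, constant, versions = p
--         if not pkgname == currentpackage:
--             currentpackage = pkgname
--             i+=1
--             anchor = anchor_config[i]
--             found = False
--         elif pkgname == currentpackage and found: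
--             continue
--
--         if anchor in versions:
--             found = True
--             out.append(versions)
--
--     assert len(out) == len(anchor_config)
--     return out
-- ===== SOURCE B (Python) =====
-- def findworkingminiseries(miniseries, anchor_config):
--     """Recursive run-splitting: peel off each maximal run of consecutive
--     entries with the same package name, pair it with its anchor by index,
--     and take the first matching versions list via next()."""
--     def go(ms, i):
--         if not ms:
--             return []
--         name = ms[0][0]
--         k = 1
--         while k < len(ms) and ms[k][0] == name:
--             k += 1
--         anchor = anchor_config[i]
--         hit = next((v for (_, _, v) in ms[:k] if anchor in v), None)
--         rest = go(ms[k:], i + 1)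
--         return ([hit] if hit is not None else []) + rest
--     out = go(miniseries, 0)
--     assert len(out) == len(anchor_config)
--     return out
-- ===== Notes on version B (the rewrite author's own statement) =====
-- stated objective: alternative
-- what changed: Replaces A's single-pass mutable state machine (i/currentpackage/anchor/found flags) with a recursive run-splitter that peels off each maximal run of equal package names, pairs it with its anchor by index, and takes the first matching versions list via next().
-- outside the precondition, e.g. on findworkingminiseries([('', 'c', ['v'])], []): A returns [], B raises IndexError
import Mathlib
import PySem

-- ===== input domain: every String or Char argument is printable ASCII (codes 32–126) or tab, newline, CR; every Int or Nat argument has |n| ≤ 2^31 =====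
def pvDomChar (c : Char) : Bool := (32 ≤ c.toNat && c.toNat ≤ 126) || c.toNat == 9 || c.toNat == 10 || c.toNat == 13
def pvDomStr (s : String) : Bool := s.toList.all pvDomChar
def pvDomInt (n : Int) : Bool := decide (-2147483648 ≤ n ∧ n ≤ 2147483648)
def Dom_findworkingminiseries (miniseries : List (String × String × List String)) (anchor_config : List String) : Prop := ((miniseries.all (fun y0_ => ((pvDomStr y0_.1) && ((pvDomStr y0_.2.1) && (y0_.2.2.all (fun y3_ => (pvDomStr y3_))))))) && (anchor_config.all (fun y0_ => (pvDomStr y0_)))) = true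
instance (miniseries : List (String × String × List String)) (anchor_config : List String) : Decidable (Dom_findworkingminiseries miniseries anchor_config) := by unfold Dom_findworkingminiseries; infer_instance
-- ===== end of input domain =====

-- B re-implements A's mutable state machine as recursive run-splitting with a per-run
-- first-match; equivalence of RETURN VALUES is proved on Pre_ (where Python A returns).

-- `a in versions` for an Option-valued anchor: Python's `None in versions` is False.
def pvHit (anchor : Option String) (versions : List String) : Bool :=
  match anchor with
  | some a => versions.contains a
  | none => false

-- ===== PORT A =====
-- A's loop body: state = (out, i, currentpackage, anchor, found).
-- anchor_config[i] is PySem.List.pyGet?; inside Pre_ it is never none (no IndexError),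
-- and the assert at the end always passes inside Pre_.
def stepA (ac : List String) (s : List (List String) × Int × String × Option String × Bool)
    (p : String × String × List String) :
    List (List String) × Int × String × Option String × Bool :=
  let (out, i, cur, anchor, found) := s
  let (pkgname, _, versions) := p
  if pkgname ≠ cur then
    let i' := i + 1
    let anchor' := PySem.List.pyGet? ac i'
    if pvHit anchor' versions then (out ++ [versions], i', pkgname, anchor', true)
    else (out, i', pkgname, anchor', false)
  else if found then s
  else if pvHit anchor versions then (out ++ [versions], i, cur, anchor, true)
  else s

def findworkingminiseries (miniseries : List (String × String × List String)) (anchor_config : List String) : List (List String) :=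
  (miniseries.foldl (stepA anchor_config) ([], -1, "", none, false)).1

-- ===== PORT B =====
-- the inner `go` of Source B: the k-scan `while k < len(ms) and ms[k][0] == name` splits the
-- tail into takeWhile/dropWhile of (·.1 = name); `next(... )` is find?.
def goB (ms : List (String × String × List String)) (ac : List String) (i : Int) :
    List (List String) :=
  match ms with
  | [] => []
  | (name, _, v) :: rest =>
    let run := rest.takeWhile (fun q => q.1 = name)
    let rest' := rest.dropWhile (fun q => q.1 = name)
    let anchor := PySem.List.pyGet? ac i
    let hit := (v :: run.map (fun q => q.2.2)).find? (fun vs => pvHit anchor vs)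
    (match hit with | some h => [h] | none => []) ++ goB rest' ac (i + 1)
termination_by ms.length
decreasing_by
  simp only [List.length_cons]
  exact Nat.lt_succ_of_le (List.length_dropWhile_le _ _)

def findworkingminiseries_alt (miniseries : List (String × String × List String)) (anchor_config : List String) : List (List String) :=
  goB miniseries anchor_config 0

-- ===== PRECONDITION & SPEC =====
-- the maximal runs of consecutive entries with the same package name
-- structural right-fold grouping: a shape description of the input, not either port's recursion
def pvRuns : List (String × String × List String) → List (String × List (List String))
  | [] => []
  | (name, _, v) :: rest =>
    match pvRuns rest with
    | (m, vs) :: gs => if m = name then (name, v :: vs) :: gs else (name, [v]) :: (m, vs) :: gs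
    | [] => [(name, [v])]

-- Pre_ excludes (a) inputs where Python A raises (IndexError when runs outnumber anchors,
-- AssertionError when a run has no anchor match or runs are fewer than anchors), and
-- (b) inputs whose FIRST package name is the empty string: A's '' sentinel for
-- currentpackage silently merges that leading run into no group (anchor stays None),
-- an artefact of the sentinel, while B indexes an anchor for it and raises IndexError.
def Pre_findworkingminiseries (miniseries : List (String × String × List String)) (anchor_config : List String) : Prop :=
  miniseries.head?.map (fun p => p.1) ≠ some "" ∧
  (pvRuns miniseries).length = anchor_config.length ∧
  ∀ pr ∈ (pvRuns miniseries).zip anchor_config, ∃ v ∈ pr.1.2, pr.2 ∈ v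

instance (miniseries : List (String × String × List String)) (anchor_config : List String) : Decidable (Pre_findworkingminiseries miniseries anchor_config) := by unfold Pre_findworkingminiseries; infer_instance

def pvWitness_findworkingminiseries : (List (String × String × List String)) × List String :=
  ([("a", "c", ["v1"]), ("a", "c", ["v2"]), ("b", "c", ["v2", "v3"])], ["v2", "v3"])

def Spec_findworkingminiseries (miniseries : List (String × String × List String)) (anchor_config : List String) (out : List (List String)) : Prop := out = findworkingminiseries_alt miniseries anchor_config
instance (miniseries : List (String × String × List String)) (anchor_config : List String) (out : List (List String)) : Decidable (Spec_findworkingminiseries miniseries anchor_config out) := by unfold Spec_findworkingminiseries; infer_instance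

-- ===== CLAIM (what is proved, stated in full; the proofs are below) =====
def Claim_equal_findworkingminiseries : Prop := ∀ (miniseries : List (String × String × List String)) (anchor_config : List String), Dom_findworkingminiseries miniseries anchor_config → Pre_findworkingminiseries miniseries anchor_config → Spec_findworkingminiseries miniseries anchor_config (findworkingminiseries miniseries anchor_config)

-- ===== LEMMAS AND PROOFS =====

-- after `found` is set, A's loop skips every remaining entry of the current run
lemma foldA_run_found (ac : List String) (n : String) (run : List (String × String × List String))
    (h : ∀ q ∈ run, q.1 = n) (out : List (List String)) (i : Int) (anchor : Option String) :
    List.foldl (stepA ac) (out, i, n, anchor, true) run = (out, i, n, anchor, true) := by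
  induction run with
  | nil => rfl
  | cons q rest ih =>
    have hq : q.1 = n := h q (by simp)
    simp only [List.foldl_cons]
    have hstep : stepA ac (out, i, n, anchor, true) q = (out, i, n, anchor, true) := by
      obtain ⟨qn, qc, qv⟩ := q
      simp only at hq
      simp [stepA, hq]
    rw [hstep]
    exact ih (fun q hq => h q (by simp [hq]))

-- with `found` false, A's loop over a run appends the first matching versions (if any)
lemma foldA_run_scan (ac : List String) (n : String) (run : List (String × String × List String))
    (h : ∀ q ∈ run, q.1 = n) (out : List (List String)) (i : Int) (anchor : Option String) :
    List.foldl (stepA ac) (out, i, n, anchor, false) run =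
      match run.find? (fun q => pvHit anchor q.2.2) with
      | some q => (out ++ [q.2.2], i, n, anchor, true)
      | none => (out, i, n, anchor, false) := by
  induction run with
  | nil => rfl
  | cons q rest ih =>
    have hq : q.1 = n := h q (by simp)
    obtain ⟨qn, qc, qv⟩ := q
    simp only at hq
    rw [hq]
    by_cases hv : pvHit anchor qv = true
    · simp only [List.foldl_cons]
      have hstep : stepA ac (out, i, n, anchor, false) (n, qc, qv)
          = (out ++ [qv], i, n, anchor, true) := by simp [stepA, hv]
      rw [hstep, foldA_run_found ac n rest (fun q hq => h q (by simp [hq]))]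
      simp [hv]
    · simp only [List.foldl_cons]
      have hstep : stepA ac (out, i, n, anchor, false) (n, qc, qv)
          = (out, i, n, anchor, false) := by simp [stepA, hv]
      rw [hstep, ih (fun q hq => h q (by simp [hq]))]
      simp [hv]

lemma head_dropWhile_ne {α : Type} (p : α → Bool) (l : List α) :
    ∀ x ∈ (l.dropWhile p).head?, p x = false := by
  induction l with
  | nil => simp
  | cons a l ih =>
    by_cases ha : p a = true
    · simpa [List.dropWhile, ha] using ih
    · simp [List.dropWhile, ha]

-- main invariant: at a run boundary, A's remaining fold yields out ++ B's remaining output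
lemma foldA_eq_goB (N : Nat) : ∀ (ms : List (String × String × List String)), ms.length ≤ N →
    ∀ (ac : List String) (out : List (List String)) (i : Int) (cur : String)
      (anchor : Option String) (found : Bool),
      (∀ p ∈ ms.head?, p.1 ≠ cur) →
      (List.foldl (stepA ac) (out, i, cur, anchor, found) ms).1 = out ++ goB ms ac (i + 1) := by
  induction N with
  | zero =>
    intro ms hlen ac out i cur anchor found _
    have : ms = [] := List.eq_nil_of_length_eq_zero (Nat.le_zero.mp hlen)
    subst this; simp [goB]
  | succ N ih =>
    intro ms hlen ac out i cur anchor found hhd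
    match ms with
    | [] => simp [goB]
    | (n, c, v) :: rest =>
      have hn : n ≠ cur := by simpa using hhd (n, c, v) (by simp)
      set run := rest.takeWhile (fun q => q.1 = n) with hrun
      set rest' := rest.dropWhile (fun q => q.1 = n) with hrest'
      have hsplit : rest = run ++ rest' := (List.takeWhile_append_dropWhile).symm
      have hrunall : ∀ q ∈ run, q.1 = n := by
        intro q hq
        have := List.mem_takeWhile_imp (hrun ▸ hq)
        simpa using this
      have hlen' : rest'.length ≤ N := by
        have h1 : rest'.length ≤ rest.length := List.length_dropWhile_le _ _
        have h2 : rest.length + 1 ≤ N + 1 := by simpa using hlen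
        omega
      have hhd' : ∀ p ∈ rest'.head?, p.1 ≠ n := by
        intro p hp
        have := head_dropWhile_ne (fun q => q.1 = n) rest p (hrest' ▸ hp)
        simpa using this
      have hgo : goB ((n, c, v) :: rest) ac (i + 1) =
          (match (v :: run.map (fun q => q.2.2)).find?
              (fun vs => pvHit (PySem.List.pyGet? ac (i + 1)) vs) with
            | some h => [h] | none => []) ++ goB rest' ac (i + 1 + 1) := by
        rw [goB]
      rw [hsplit] at hgo
      by_cases hv : pvHit (PySem.List.pyGet? ac (i + 1)) v = true
      · have hstep : stepA ac (out, i, cur, anchor, found) (n, c, v)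
            = (out ++ [v], i + 1, n, PySem.List.pyGet? ac (i + 1), true) := by
          simp [stepA, hn, hv]
        rw [List.foldl_cons, hstep, hsplit, List.foldl_append,
          foldA_run_found ac n run hrunall,
          ih rest' hlen' ac (out ++ [v]) (i + 1) n (PySem.List.pyGet? ac (i + 1)) true hhd',
          hgo]
        simp [hv]
      · have hstep : stepA ac (out, i, cur, anchor, found) (n, c, v)
            = (out, i + 1, n, PySem.List.pyGet? ac (i + 1), false) := by
          simp [stepA, hn, hv]
        rw [List.foldl_cons, hstep, hsplit, List.foldl_append,
          foldA_run_scan ac n run hrunall]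
        have hfind : (run.map (fun q => q.2.2)).find?
            (fun vs => pvHit (PySem.List.pyGet? ac (i + 1)) vs)
            = (run.find? (fun q => pvHit (PySem.List.pyGet? ac (i + 1)) q.2.2)).map
                (fun q => q.2.2) := by
          rw [List.find?_map]; rfl
        cases hcase : run.find? (fun q => pvHit (PySem.List.pyGet? ac (i + 1)) q.2.2) with
        | some q =>
          rw [ih rest' hlen' ac (out ++ [q.2.2]) (i + 1) n (PySem.List.pyGet? ac (i + 1)) true hhd',
            hgo]
          simp [hv, hfind, hcase]
        | none =>
          rw [ih rest' hlen' ac out (i + 1) n (PySem.List.pyGet? ac (i + 1)) false hhd', hgo]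
          simp [hv, hfind, hcase]

-- ===== VERDICT (by name: the statement is the Claim_ definition above) =====
theorem findworkingminiseries_spec : Claim_equal_findworkingminiseries := by
  intro ms ac _ hpre
  unfold Spec_findworkingminiseries findworkingminiseries findworkingminiseries_alt
  have hhd : ∀ p ∈ ms.head?, p.1 ≠ "" := by
    intro p hp h
    exact hpre.1 (by cases ms with
      | nil => simp at hp
      | cons a l => simp at hp; subst hp; simp [h])
  have := foldA_eq_goB ms.length ms (le_refl _) ac [] (-1) "" none false hhd
  simpa using this
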